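-- pv_equiv track=rewrite | github.com/shyam451/iso-file-transformation | scripts/enhance_xml_with_optional_fields.py | get_scenario_fields
-- ===== SOURCE A (Python) =====
-- def get_scenario_fields(scenario_name, examples):
--     """Get fields specific to a payment scenario."""
--     scenario_fields = {}
--
--     scenario_fields['/Document/FIToFICstmrCdtTrf/GrpHdr/MsgId'] = f"MSG-{scenario_name.replace(' ', '-').upper()}-001"
--     scenario_fields['/Document/FIToFICstmrCdtTrf/GrpHdr/CreDtTm'] = "2025-04-03T12:00:00Z"
--     scenario_fields['/Document/FIToFICstmrCdtTrf/GrpHdr/NbOfTxs'] = "1"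
--     scenario_fields['/Document/FIToFICstmrCdtTrf/GrpHdr/SttlmInf/SttlmMtd'] = "CLRG"
--     scenario_fields['/Document/FIToFICstmrCdtTrf/CdtTrfTxInf/PmtId/EndToEndId'] = f"E2E-{scenario_name.replace(' ', '-').upper()}-001"
--
--     if scenario_name == "Domestic Payment":
--         scenario_fields['/Document/FIToFICstmrCdtTrf/GrpHdr/InstgAgt/FinInstnId/BICFI'] = "BANKCA00XXX"
--         scenario_fields['/Document/FIToFICstmrCdtTrf/GrpHdr/InstdAgt/FinInstnId/BICFI'] = "BANKCA01XXX"
--         scenario_fields['/Document/FIToFICstmrCdtTrf/CdtTrfTxInf/PmtTpInf/SvcLvl/Cd'] = "NURG"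
--         scenario_fields['/Document/FIToFICstmrCdtTrf/CdtTrfTxInf/PmtTpInf/LclInstrm/Cd'] = "RTR"
--         scenario_fields['/Document/FIToFICstmrCdtTrf/CdtTrfTxInf/Dbtr/Nm'] = "John Smith"
--         scenario_fields['/Document/FIToFICstmrCdtTrf/CdtTrfTxInf/Dbtr/PstlAdr/StrtNm'] = "123 Maple Street"
--         scenario_fields['/Document/FIToFICstmrCdtTrf/CdtTrfTxInf/Dbtr/PstlAdr/TwnNm'] = "Toronto"
--         scenario_fields['/Document/FIToFICstmrCdtTrf/CdtTrfTxInf/Dbtr/PstlAdr/Ctry'] = "CA"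
--         scenario_fields['/Document/FIToFICstmrCdtTrf/CdtTrfTxInf/Dbtr/CtryOfRes'] = "CA"
--         scenario_fields['/Document/FIToFICstmrCdtTrf/CdtTrfTxInf/DbtrAcct/Id/Othr/Id'] = "12345678"
--         scenario_fields['/Document/FIToFICstmrCdtTrf/CdtTrfTxInf/DbtrAgt/FinInstnId/BICFI'] = "BANKCA00XXX"
--         scenario_fields['/Document/FIToFICstmrCdtTrf/CdtTrfTxInf/Cdtr/Nm'] = "Jane Doe"
--         scenario_fields['/Document/FIToFICstmrCdtTrf/CdtTrfTxInf/Cdtr/PstlAdr/StrtNm'] = "456 Oak Avenue"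
--         scenario_fields['/Document/FIToFICstmrCdtTrf/CdtTrfTxInf/Cdtr/PstlAdr/TwnNm'] = "Vancouver"
--         scenario_fields['/Document/FIToFICstmrCdtTrf/CdtTrfTxInf/Cdtr/PstlAdr/Ctry'] = "CA"
--         scenario_fields['/Document/FIToFICstmrCdtTrf/CdtTrfTxInf/Cdtr/CtryOfRes'] = "CA"
--         scenario_fields['/Document/FIToFICstmrCdtTrf/CdtTrfTxInf/CdtrAcct/Id/Othr/Id'] = "87654321"
--         scenario_fields['/Document/FIToFICstmrCdtTrf/CdtTrfTxInf/CdtrAgt/FinInstnId/BICFI'] = "BANKCA01XXX"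
--         scenario_fields['/Document/FIToFICstmrCdtTrf/CdtTrfTxInf/IntrBkSttlmAmt'] = "5000.00"
--         scenario_fields['/Document/FIToFICstmrCdtTrf/CdtTrfTxInf/IntrBkSttlmAmt/Ccy'] = "CAD"
--         scenario_fields['/Document/FIToFICstmrCdtTrf/CdtTrfTxInf/Purp/Cd'] = "CASH"
--         scenario_fields['/Document/FIToFICstmrCdtTrf/CdtTrfTxInf/RmtInf/Ustrd'] = "Payment for services"
--
--     elif scenario_name == "Cross-Border Payment":
--         scenario_fields['/Document/FIToFICstmrCdtTrf/GrpHdr/InstgAgt/FinInstnId/BICFI'] = "BANKCA00XXX"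
--         scenario_fields['/Document/FIToFICstmrCdtTrf/GrpHdr/InstdAgt/FinInstnId/BICFI'] = "BANKUS00XXX"
--         scenario_fields['/Document/FIToFICstmrCdtTrf/CdtTrfTxInf/PmtTpInf/SvcLvl/Cd'] = "NURG"
--         scenario_fields['/Document/FIToFICstmrCdtTrf/CdtTrfTxInf/PmtTpInf/LclInstrm/Cd'] = "RTR"
--         scenario_fields['/Document/FIToFICstmrCdtTrf/CdtTrfTxInf/Dbtr/Nm'] = "John Smith"
--         scenario_fields['/Document/FIToFICstmrCdtTrf/CdtTrfTxInf/Dbtr/PstlAdr/StrtNm'] = "123 Maple Street"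
--         scenario_fields['/Document/FIToFICstmrCdtTrf/CdtTrfTxInf/Dbtr/PstlAdr/TwnNm'] = "Toronto"
--         scenario_fields['/Document/FIToFICstmrCdtTrf/CdtTrfTxInf/Dbtr/PstlAdr/Ctry'] = "CA"
--         scenario_fields['/Document/FIToFICstmrCdtTrf/CdtTrfTxInf/Dbtr/CtryOfRes'] = "CA"
--         scenario_fields['/Document/FIToFICstmrCdtTrf/CdtTrfTxInf/DbtrAcct/Id/Othr/Id'] = "12345678"
--         scenario_fields['/Document/FIToFICstmrCdtTrf/CdtTrfTxInf/DbtrAgt/FinInstnId/BICFI'] = "BANKCA00XXX"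
--         scenario_fields['/Document/FIToFICstmrCdtTrf/CdtTrfTxInf/Cdtr/Nm'] = "Bob Johnson"
--         scenario_fields['/Document/FIToFICstmrCdtTrf/CdtTrfTxInf/Cdtr/PstlAdr/StrtNm'] = "789 Pine Road"
--         scenario_fields['/Document/FIToFICstmrCdtTrf/CdtTrfTxInf/Cdtr/PstlAdr/TwnNm'] = "New York"
--         scenario_fields['/Document/FIToFICstmrCdtTrf/CdtTrfTxInf/Cdtr/PstlAdr/Ctry'] = "US"
--         scenario_fields['/Document/FIToFICstmrCdtTrf/CdtTrfTxInf/Cdtr/CtryOfRes'] = "US"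
--         scenario_fields['/Document/FIToFICstmrCdtTrf/CdtTrfTxInf/CdtrAcct/Id/Othr/Id'] = "87654321"
--         scenario_fields['/Document/FIToFICstmrCdtTrf/CdtTrfTxInf/CdtrAgt/FinInstnId/BICFI'] = "BANKUS00XXX"
--         scenario_fields['/Document/FIToFICstmrCdtTrf/CdtTrfTxInf/IntrBkSttlmAmt'] = "7500.00"
--         scenario_fields['/Document/FIToFICstmrCdtTrf/CdtTrfTxInf/IntrBkSttlmAmt/Ccy'] = "USD"
--         scenario_fields['/Document/FIToFICstmrCdtTrf/CdtTrfTxInf/XchgRateInf/RateTp'] = "SPOT"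
--         scenario_fields['/Document/FIToFICstmrCdtTrf/CdtTrfTxInf/XchgRateInf/XchgRate'] = "1.25"
--         scenario_fields['/Document/FIToFICstmrCdtTrf/CdtTrfTxInf/ChrgBr'] = "SHAR"
--         scenario_fields['/Document/FIToFICstmrCdtTrf/CdtTrfTxInf/Purp/Cd'] = "INTC"
--         scenario_fields['/Document/FIToFICstmrCdtTrf/CdtTrfTxInf/RmtInf/Ustrd'] = "Invoice payment #12345"
--
--
--     for path, value in examples.items():
--         if path not in scenario_fields:
--             scenario_fields[path] = value
--
--     return scenario_fields
-- ===== SOURCE B (Python) =====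
-- # B: build one declarative candidate stream (common fields, then the scenario's
-- # table entry, then the examples) and keep the FIRST occurrence of every path
-- # with a generic seen-set dedup pass; A instead mutates a dict branch by branch
-- # and runs a membership-checking insertion loop.
--
-- SCENARIO_TABLE = {
--     "Domestic Payment": [
--         ('/Document/FIToFICstmrCdtTrf/GrpHdr/InstgAgt/FinInstnId/BICFI', "BANKCA00XXX"),
--         ('/Document/FIToFICstmrCdtTrf/GrpHdr/InstdAgt/FinInstnId/BICFI', "BANKCA01XXX"),
--         ('/Document/FIToFICstmrCdtTrf/CdtTrfTxInf/PmtTpInf/SvcLvl/Cd', "NURG"),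
--         ('/Document/FIToFICstmrCdtTrf/CdtTrfTxInf/PmtTpInf/LclInstrm/Cd', "RTR"),
--         ('/Document/FIToFICstmrCdtTrf/CdtTrfTxInf/Dbtr/Nm', "John Smith"),
--         ('/Document/FIToFICstmrCdtTrf/CdtTrfTxInf/Dbtr/PstlAdr/StrtNm', "123 Maple Street"),
--         ('/Document/FIToFICstmrCdtTrf/CdtTrfTxInf/Dbtr/PstlAdr/TwnNm', "Toronto"),
--         ('/Document/FIToFICstmrCdtTrf/CdtTrfTxInf/Dbtr/PstlAdr/Ctry', "CA"),
--         ('/Document/FIToFICstmrCdtTrf/CdtTrfTxInf/Dbtr/CtryOfRes', "CA"),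
--         ('/Document/FIToFICstmrCdtTrf/CdtTrfTxInf/DbtrAcct/Id/Othr/Id', "12345678"),
--         ('/Document/FIToFICstmrCdtTrf/CdtTrfTxInf/DbtrAgt/FinInstnId/BICFI', "BANKCA00XXX"),
--         ('/Document/FIToFICstmrCdtTrf/CdtTrfTxInf/Cdtr/Nm', "Jane Doe"),
--         ('/Document/FIToFICstmrCdtTrf/CdtTrfTxInf/Cdtr/PstlAdr/StrtNm', "456 Oak Avenue"),
--         ('/Document/FIToFICstmrCdtTrf/CdtTrfTxInf/Cdtr/PstlAdr/TwnNm', "Vancouver"),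
--         ('/Document/FIToFICstmrCdtTrf/CdtTrfTxInf/Cdtr/PstlAdr/Ctry', "CA"),
--         ('/Document/FIToFICstmrCdtTrf/CdtTrfTxInf/Cdtr/CtryOfRes', "CA"),
--         ('/Document/FIToFICstmrCdtTrf/CdtTrfTxInf/CdtrAcct/Id/Othr/Id', "87654321"),
--         ('/Document/FIToFICstmrCdtTrf/CdtTrfTxInf/CdtrAgt/FinInstnId/BICFI', "BANKCA01XXX"),
--         ('/Document/FIToFICstmrCdtTrf/CdtTrfTxInf/IntrBkSttlmAmt', "5000.00"),
--         ('/Document/FIToFICstmrCdtTrf/CdtTrfTxInf/IntrBkSttlmAmt/Ccy', "CAD"),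
--         ('/Document/FIToFICstmrCdtTrf/CdtTrfTxInf/Purp/Cd', "CASH"),
--         ('/Document/FIToFICstmrCdtTrf/CdtTrfTxInf/RmtInf/Ustrd', "Payment for services"),
--     ],
--     "Cross-Border Payment": [
--         ('/Document/FIToFICstmrCdtTrf/GrpHdr/InstgAgt/FinInstnId/BICFI', "BANKCA00XXX"),
--         ('/Document/FIToFICstmrCdtTrf/GrpHdr/InstdAgt/FinInstnId/BICFI', "BANKUS00XXX"),
--         ('/Document/FIToFICstmrCdtTrf/CdtTrfTxInf/PmtTpInf/SvcLvl/Cd', "NURG"),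
--         ('/Document/FIToFICstmrCdtTrf/CdtTrfTxInf/PmtTpInf/LclInstrm/Cd', "RTR"),
--         ('/Document/FIToFICstmrCdtTrf/CdtTrfTxInf/Dbtr/Nm', "John Smith"),
--         ('/Document/FIToFICstmrCdtTrf/CdtTrfTxInf/Dbtr/PstlAdr/StrtNm', "123 Maple Street"),
--         ('/Document/FIToFICstmrCdtTrf/CdtTrfTxInf/Dbtr/PstlAdr/TwnNm', "Toronto"),
--         ('/Document/FIToFICstmrCdtTrf/CdtTrfTxInf/Dbtr/PstlAdr/Ctry', "CA"),
--         ('/Document/FIToFICstmrCdtTrf/CdtTrfTxInf/Dbtr/CtryOfRes', "CA"),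
--         ('/Document/FIToFICstmrCdtTrf/CdtTrfTxInf/DbtrAcct/Id/Othr/Id', "12345678"),
--         ('/Document/FIToFICstmrCdtTrf/CdtTrfTxInf/DbtrAgt/FinInstnId/BICFI', "BANKCA00XXX"),
--         ('/Document/FIToFICstmrCdtTrf/CdtTrfTxInf/Cdtr/Nm', "Bob Johnson"),
--         ('/Document/FIToFICstmrCdtTrf/CdtTrfTxInf/Cdtr/PstlAdr/StrtNm', "789 Pine Road"),
--         ('/Document/FIToFICstmrCdtTrf/CdtTrfTxInf/Cdtr/PstlAdr/TwnNm', "New York"),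
--         ('/Document/FIToFICstmrCdtTrf/CdtTrfTxInf/Cdtr/PstlAdr/Ctry', "US"),
--         ('/Document/FIToFICstmrCdtTrf/CdtTrfTxInf/Cdtr/CtryOfRes', "US"),
--         ('/Document/FIToFICstmrCdtTrf/CdtTrfTxInf/CdtrAcct/Id/Othr/Id', "87654321"),
--         ('/Document/FIToFICstmrCdtTrf/CdtTrfTxInf/CdtrAgt/FinInstnId/BICFI', "BANKUS00XXX"),
--         ('/Document/FIToFICstmrCdtTrf/CdtTrfTxInf/IntrBkSttlmAmt', "7500.00"),
--         ('/Document/FIToFICstmrCdtTrf/CdtTrfTxInf/IntrBkSttlmAmt/Ccy', "USD"),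
--         ('/Document/FIToFICstmrCdtTrf/CdtTrfTxInf/XchgRateInf/RateTp', "SPOT"),
--         ('/Document/FIToFICstmrCdtTrf/CdtTrfTxInf/XchgRateInf/XchgRate', "1.25"),
--         ('/Document/FIToFICstmrCdtTrf/CdtTrfTxInf/ChrgBr', "SHAR"),
--         ('/Document/FIToFICstmrCdtTrf/CdtTrfTxInf/Purp/Cd', "INTC"),
--         ('/Document/FIToFICstmrCdtTrf/CdtTrfTxInf/RmtInf/Ustrd', "Invoice payment #12345"),
--     ],
-- }
--
--
-- def _first_wins(pairs):
--     """Keep the first occurrence of every key, in order."""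
--     seen = set()
--     out = []
--     for k, v in pairs:
--         if k not in seen:
--             seen.add(k)
--             out.append((k, v))
--     return out
--
--
-- def get_scenario_fields(scenario_name, examples):
--     """Get fields specific to a payment scenario (candidate stream + first-wins dedup)."""
--     tag = scenario_name.replace(' ', '-').upper()
--     stream = [
--         ('/Document/FIToFICstmrCdtTrf/GrpHdr/MsgId', f"MSG-{tag}-001"),
--         ('/Document/FIToFICstmrCdtTrf/GrpHdr/CreDtTm', "2025-04-03T12:00:00Z"),
--         ('/Document/FIToFICstmrCdtTrf/GrpHdr/NbOfTxs', "1"),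
--         ('/Document/FIToFICstmrCdtTrf/GrpHdr/SttlmInf/SttlmMtd', "CLRG"),
--         ('/Document/FIToFICstmrCdtTrf/CdtTrfTxInf/PmtId/EndToEndId', f"E2E-{tag}-001"),
--     ] + SCENARIO_TABLE.get(scenario_name, []) + list(examples.items())
--     return dict(_first_wins(stream))
-- ===== Notes on version B (the rewrite author's own statement) =====
-- stated objective: alternative
-- what changed: Instead of mutating a dict (5 common inserts, an if/elif chain of scenario inserts, then a membership-checking insertion loop over examples), B declaratively concatenates one candidate stream — common pairs + a scenario lookup table entry + the examples' pairs — and produces the result with a single generic first-occurrence-wins dedup pass over that stream.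
import Mathlib
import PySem

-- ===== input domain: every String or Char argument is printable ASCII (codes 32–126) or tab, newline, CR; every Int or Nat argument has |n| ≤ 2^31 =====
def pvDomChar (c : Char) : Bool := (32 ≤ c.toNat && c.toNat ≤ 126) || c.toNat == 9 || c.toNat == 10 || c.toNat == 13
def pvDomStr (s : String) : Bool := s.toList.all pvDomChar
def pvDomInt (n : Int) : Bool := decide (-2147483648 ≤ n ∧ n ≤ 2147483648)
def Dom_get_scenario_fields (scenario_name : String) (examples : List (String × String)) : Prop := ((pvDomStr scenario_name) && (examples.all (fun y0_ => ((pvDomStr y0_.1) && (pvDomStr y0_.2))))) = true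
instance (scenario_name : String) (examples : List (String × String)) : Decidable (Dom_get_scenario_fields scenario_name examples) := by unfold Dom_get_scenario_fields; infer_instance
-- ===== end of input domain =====

-- B replaces A's imperative dict mutation (branch-by-branch inserts + a membership-checking
-- insertion loop) by ONE declarative candidate stream deduplicated with a generic
-- first-occurrence-wins pass over a seen-key set (alternative decomposition, same cost).
-- ===== PORT A =====
-- Literal port of A: a dict built by an insert chain, an if/elif on the scenario
-- name, then a membership-checked insertion loop over `examples`.
def get_scenario_fields (scenario_name : String) (examples : List (String × String)) : List (String × String) :=
  let d : PySem.Dict String String := PySem.Dict.empty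
  let d := d.insert "/Document/FIToFICstmrCdtTrf/GrpHdr/MsgId" ("MSG-" ++ PySem.Str.upper (PySem.Str.replace scenario_name " " "-") ++ "-001")
  let d := d.insert "/Document/FIToFICstmrCdtTrf/GrpHdr/CreDtTm" "2025-04-03T12:00:00Z"
  let d := d.insert "/Document/FIToFICstmrCdtTrf/GrpHdr/NbOfTxs" "1"
  let d := d.insert "/Document/FIToFICstmrCdtTrf/GrpHdr/SttlmInf/SttlmMtd" "CLRG"
  let d := d.insert "/Document/FIToFICstmrCdtTrf/CdtTrfTxInf/PmtId/EndToEndId" ("E2E-" ++ PySem.Str.upper (PySem.Str.replace scenario_name " " "-") ++ "-001")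
  let d :=
    if scenario_name = "Domestic Payment" then
      let d := d.insert "/Document/FIToFICstmrCdtTrf/GrpHdr/InstgAgt/FinInstnId/BICFI" "BANKCA00XXX"
      let d := d.insert "/Document/FIToFICstmrCdtTrf/GrpHdr/InstdAgt/FinInstnId/BICFI" "BANKCA01XXX"
      let d := d.insert "/Document/FIToFICstmrCdtTrf/CdtTrfTxInf/PmtTpInf/SvcLvl/Cd" "NURG"
      let d := d.insert "/Document/FIToFICstmrCdtTrf/CdtTrfTxInf/PmtTpInf/LclInstrm/Cd" "RTR"
      let d := d.insert "/Document/FIToFICstmrCdtTrf/CdtTrfTxInf/Dbtr/Nm" "John Smith"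
      let d := d.insert "/Document/FIToFICstmrCdtTrf/CdtTrfTxInf/Dbtr/PstlAdr/StrtNm" "123 Maple Street"
      let d := d.insert "/Document/FIToFICstmrCdtTrf/CdtTrfTxInf/Dbtr/PstlAdr/TwnNm" "Toronto"
      let d := d.insert "/Document/FIToFICstmrCdtTrf/CdtTrfTxInf/Dbtr/PstlAdr/Ctry" "CA"
      let d := d.insert "/Document/FIToFICstmrCdtTrf/CdtTrfTxInf/Dbtr/CtryOfRes" "CA"
      let d := d.insert "/Document/FIToFICstmrCdtTrf/CdtTrfTxInf/DbtrAcct/Id/Othr/Id" "12345678"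
      let d := d.insert "/Document/FIToFICstmrCdtTrf/CdtTrfTxInf/DbtrAgt/FinInstnId/BICFI" "BANKCA00XXX"
      let d := d.insert "/Document/FIToFICstmrCdtTrf/CdtTrfTxInf/Cdtr/Nm" "Jane Doe"
      let d := d.insert "/Document/FIToFICstmrCdtTrf/CdtTrfTxInf/Cdtr/PstlAdr/StrtNm" "456 Oak Avenue"
      let d := d.insert "/Document/FIToFICstmrCdtTrf/CdtTrfTxInf/Cdtr/PstlAdr/TwnNm" "Vancouver"
      let d := d.insert "/Document/FIToFICstmrCdtTrf/CdtTrfTxInf/Cdtr/PstlAdr/Ctry" "CA"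
      let d := d.insert "/Document/FIToFICstmrCdtTrf/CdtTrfTxInf/Cdtr/CtryOfRes" "CA"
      let d := d.insert "/Document/FIToFICstmrCdtTrf/CdtTrfTxInf/CdtrAcct/Id/Othr/Id" "87654321"
      let d := d.insert "/Document/FIToFICstmrCdtTrf/CdtTrfTxInf/CdtrAgt/FinInstnId/BICFI" "BANKCA01XXX"
      let d := d.insert "/Document/FIToFICstmrCdtTrf/CdtTrfTxInf/IntrBkSttlmAmt" "5000.00"
      let d := d.insert "/Document/FIToFICstmrCdtTrf/CdtTrfTxInf/IntrBkSttlmAmt/Ccy" "CAD"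
      let d := d.insert "/Document/FIToFICstmrCdtTrf/CdtTrfTxInf/Purp/Cd" "CASH"
      let d := d.insert "/Document/FIToFICstmrCdtTrf/CdtTrfTxInf/RmtInf/Ustrd" "Payment for services"
      d
    else if scenario_name = "Cross-Border Payment" then
      let d := d.insert "/Document/FIToFICstmrCdtTrf/GrpHdr/InstgAgt/FinInstnId/BICFI" "BANKCA00XXX"
      let d := d.insert "/Document/FIToFICstmrCdtTrf/GrpHdr/InstdAgt/FinInstnId/BICFI" "BANKUS00XXX"
      let d := d.insert "/Document/FIToFICstmrCdtTrf/CdtTrfTxInf/PmtTpInf/SvcLvl/Cd" "NURG"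
      let d := d.insert "/Document/FIToFICstmrCdtTrf/CdtTrfTxInf/PmtTpInf/LclInstrm/Cd" "RTR"
      let d := d.insert "/Document/FIToFICstmrCdtTrf/CdtTrfTxInf/Dbtr/Nm" "John Smith"
      let d := d.insert "/Document/FIToFICstmrCdtTrf/CdtTrfTxInf/Dbtr/PstlAdr/StrtNm" "123 Maple Street"
      let d := d.insert "/Document/FIToFICstmrCdtTrf/CdtTrfTxInf/Dbtr/PstlAdr/TwnNm" "Toronto"
      let d := d.insert "/Document/FIToFICstmrCdtTrf/CdtTrfTxInf/Dbtr/PstlAdr/Ctry" "CA"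
      let d := d.insert "/Document/FIToFICstmrCdtTrf/CdtTrfTxInf/Dbtr/CtryOfRes" "CA"
      let d := d.insert "/Document/FIToFICstmrCdtTrf/CdtTrfTxInf/DbtrAcct/Id/Othr/Id" "12345678"
      let d := d.insert "/Document/FIToFICstmrCdtTrf/CdtTrfTxInf/DbtrAgt/FinInstnId/BICFI" "BANKCA00XXX"
      let d := d.insert "/Document/FIToFICstmrCdtTrf/CdtTrfTxInf/Cdtr/Nm" "Bob Johnson"
      let d := d.insert "/Document/FIToFICstmrCdtTrf/CdtTrfTxInf/Cdtr/PstlAdr/StrtNm" "789 Pine Road"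
      let d := d.insert "/Document/FIToFICstmrCdtTrf/CdtTrfTxInf/Cdtr/PstlAdr/TwnNm" "New York"
      let d := d.insert "/Document/FIToFICstmrCdtTrf/CdtTrfTxInf/Cdtr/PstlAdr/Ctry" "US"
      let d := d.insert "/Document/FIToFICstmrCdtTrf/CdtTrfTxInf/Cdtr/CtryOfRes" "US"
      let d := d.insert "/Document/FIToFICstmrCdtTrf/CdtTrfTxInf/CdtrAcct/Id/Othr/Id" "87654321"
      let d := d.insert "/Document/FIToFICstmrCdtTrf/CdtTrfTxInf/CdtrAgt/FinInstnId/BICFI" "BANKUS00XXX"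
      let d := d.insert "/Document/FIToFICstmrCdtTrf/CdtTrfTxInf/IntrBkSttlmAmt" "7500.00"
      let d := d.insert "/Document/FIToFICstmrCdtTrf/CdtTrfTxInf/IntrBkSttlmAmt/Ccy" "USD"
      let d := d.insert "/Document/FIToFICstmrCdtTrf/CdtTrfTxInf/XchgRateInf/RateTp" "SPOT"
      let d := d.insert "/Document/FIToFICstmrCdtTrf/CdtTrfTxInf/XchgRateInf/XchgRate" "1.25"
      let d := d.insert "/Document/FIToFICstmrCdtTrf/CdtTrfTxInf/ChrgBr" "SHAR"
      let d := d.insert "/Document/FIToFICstmrCdtTrf/CdtTrfTxInf/Purp/Cd" "INTC"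
      let d := d.insert "/Document/FIToFICstmrCdtTrf/CdtTrfTxInf/RmtInf/Ustrd" "Invoice payment #12345"
      d
    else d
  let d := examples.foldl (fun d kv => if d.contains kv.1 then d else d.insert kv.1 kv.2) d
  d.items

-- ===== PORT B =====
-- B-side: the scenario → specific-pairs lookup table (module constant in Source B).
def pvScenarioTable : List (String × List (String × String)) := [
  ("Domestic Payment", [
    ("/Document/FIToFICstmrCdtTrf/GrpHdr/InstgAgt/FinInstnId/BICFI", "BANKCA00XXX"),
    ("/Document/FIToFICstmrCdtTrf/GrpHdr/InstdAgt/FinInstnId/BICFI", "BANKCA01XXX"),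
    ("/Document/FIToFICstmrCdtTrf/CdtTrfTxInf/PmtTpInf/SvcLvl/Cd", "NURG"),
    ("/Document/FIToFICstmrCdtTrf/CdtTrfTxInf/PmtTpInf/LclInstrm/Cd", "RTR"),
    ("/Document/FIToFICstmrCdtTrf/CdtTrfTxInf/Dbtr/Nm", "John Smith"),
    ("/Document/FIToFICstmrCdtTrf/CdtTrfTxInf/Dbtr/PstlAdr/StrtNm", "123 Maple Street"),
    ("/Document/FIToFICstmrCdtTrf/CdtTrfTxInf/Dbtr/PstlAdr/TwnNm", "Toronto"),
    ("/Document/FIToFICstmrCdtTrf/CdtTrfTxInf/Dbtr/PstlAdr/Ctry", "CA"),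
    ("/Document/FIToFICstmrCdtTrf/CdtTrfTxInf/Dbtr/CtryOfRes", "CA"),
    ("/Document/FIToFICstmrCdtTrf/CdtTrfTxInf/DbtrAcct/Id/Othr/Id", "12345678"),
    ("/Document/FIToFICstmrCdtTrf/CdtTrfTxInf/DbtrAgt/FinInstnId/BICFI", "BANKCA00XXX"),
    ("/Document/FIToFICstmrCdtTrf/CdtTrfTxInf/Cdtr/Nm", "Jane Doe"),
    ("/Document/FIToFICstmrCdtTrf/CdtTrfTxInf/Cdtr/PstlAdr/StrtNm", "456 Oak Avenue"),
    ("/Document/FIToFICstmrCdtTrf/CdtTrfTxInf/Cdtr/PstlAdr/TwnNm", "Vancouver"),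
    ("/Document/FIToFICstmrCdtTrf/CdtTrfTxInf/Cdtr/PstlAdr/Ctry", "CA"),
    ("/Document/FIToFICstmrCdtTrf/CdtTrfTxInf/Cdtr/CtryOfRes", "CA"),
    ("/Document/FIToFICstmrCdtTrf/CdtTrfTxInf/CdtrAcct/Id/Othr/Id", "87654321"),
    ("/Document/FIToFICstmrCdtTrf/CdtTrfTxInf/CdtrAgt/FinInstnId/BICFI", "BANKCA01XXX"),
    ("/Document/FIToFICstmrCdtTrf/CdtTrfTxInf/IntrBkSttlmAmt", "5000.00"),
    ("/Document/FIToFICstmrCdtTrf/CdtTrfTxInf/IntrBkSttlmAmt/Ccy", "CAD"),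
    ("/Document/FIToFICstmrCdtTrf/CdtTrfTxInf/Purp/Cd", "CASH"),
    ("/Document/FIToFICstmrCdtTrf/CdtTrfTxInf/RmtInf/Ustrd", "Payment for services")
  ]),
  ("Cross-Border Payment", [
    ("/Document/FIToFICstmrCdtTrf/GrpHdr/InstgAgt/FinInstnId/BICFI", "BANKCA00XXX"),
    ("/Document/FIToFICstmrCdtTrf/GrpHdr/InstdAgt/FinInstnId/BICFI", "BANKUS00XXX"),
    ("/Document/FIToFICstmrCdtTrf/CdtTrfTxInf/PmtTpInf/SvcLvl/Cd", "NURG"),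
    ("/Document/FIToFICstmrCdtTrf/CdtTrfTxInf/PmtTpInf/LclInstrm/Cd", "RTR"),
    ("/Document/FIToFICstmrCdtTrf/CdtTrfTxInf/Dbtr/Nm", "John Smith"),
    ("/Document/FIToFICstmrCdtTrf/CdtTrfTxInf/Dbtr/PstlAdr/StrtNm", "123 Maple Street"),
    ("/Document/FIToFICstmrCdtTrf/CdtTrfTxInf/Dbtr/PstlAdr/TwnNm", "Toronto"),
    ("/Document/FIToFICstmrCdtTrf/CdtTrfTxInf/Dbtr/PstlAdr/Ctry", "CA"),
    ("/Document/FIToFICstmrCdtTrf/CdtTrfTxInf/Dbtr/CtryOfRes", "CA"),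
    ("/Document/FIToFICstmrCdtTrf/CdtTrfTxInf/DbtrAcct/Id/Othr/Id", "12345678"),
    ("/Document/FIToFICstmrCdtTrf/CdtTrfTxInf/DbtrAgt/FinInstnId/BICFI", "BANKCA00XXX"),
    ("/Document/FIToFICstmrCdtTrf/CdtTrfTxInf/Cdtr/Nm", "Bob Johnson"),
    ("/Document/FIToFICstmrCdtTrf/CdtTrfTxInf/Cdtr/PstlAdr/StrtNm", "789 Pine Road"),
    ("/Document/FIToFICstmrCdtTrf/CdtTrfTxInf/Cdtr/PstlAdr/TwnNm", "New York"),
    ("/Document/FIToFICstmrCdtTrf/CdtTrfTxInf/Cdtr/PstlAdr/Ctry", "US"),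
    ("/Document/FIToFICstmrCdtTrf/CdtTrfTxInf/Cdtr/CtryOfRes", "US"),
    ("/Document/FIToFICstmrCdtTrf/CdtTrfTxInf/CdtrAcct/Id/Othr/Id", "87654321"),
    ("/Document/FIToFICstmrCdtTrf/CdtTrfTxInf/CdtrAgt/FinInstnId/BICFI", "BANKUS00XXX"),
    ("/Document/FIToFICstmrCdtTrf/CdtTrfTxInf/IntrBkSttlmAmt", "7500.00"),
    ("/Document/FIToFICstmrCdtTrf/CdtTrfTxInf/IntrBkSttlmAmt/Ccy", "USD"),
    ("/Document/FIToFICstmrCdtTrf/CdtTrfTxInf/XchgRateInf/RateTp", "SPOT"),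
    ("/Document/FIToFICstmrCdtTrf/CdtTrfTxInf/XchgRateInf/XchgRate", "1.25"),
    ("/Document/FIToFICstmrCdtTrf/CdtTrfTxInf/ChrgBr", "SHAR"),
    ("/Document/FIToFICstmrCdtTrf/CdtTrfTxInf/Purp/Cd", "INTC"),
    ("/Document/FIToFICstmrCdtTrf/CdtTrfTxInf/RmtInf/Ustrd", "Invoice payment #12345")
  ])]

-- Source B's _first_wins: keep the first occurrence of every key, tracking seen keys in a set.
def pvFirstWins : List (String × String) → PySem.Set String → List (String × String)
  | [], _ => []
  | kv :: rest, seen =>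
    if PySem.Set.contains seen kv.1 then pvFirstWins rest seen
    else kv :: pvFirstWins rest (PySem.Set.add seen kv.1)

-- Port of B: one candidate stream (common pairs ++ table lookup ++ examples),
-- deduplicated first-wins.  Source B's final dict(...) over pairwise-distinct keys
-- is the identity on the association list and is ported as such.
def get_scenario_fields_alt (scenario_name : String) (examples : List (String × String)) : List (String × String) :=
  let tag := PySem.Str.upper (PySem.Str.replace scenario_name " " "-")
  let stream : List (String × String) :=
    [("/Document/FIToFICstmrCdtTrf/GrpHdr/MsgId", "MSG-" ++ tag ++ "-001"),
     ("/Document/FIToFICstmrCdtTrf/GrpHdr/CreDtTm", "2025-04-03T12:00:00Z"),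
     ("/Document/FIToFICstmrCdtTrf/GrpHdr/NbOfTxs", "1"),
     ("/Document/FIToFICstmrCdtTrf/GrpHdr/SttlmInf/SttlmMtd", "CLRG"),
     ("/Document/FIToFICstmrCdtTrf/CdtTrfTxInf/PmtId/EndToEndId", "E2E-" ++ tag ++ "-001")]
    ++ ((pvScenarioTable.lookup scenario_name).getD [])
    ++ examples
  pvFirstWins stream PySem.Set.empty

-- ===== PRECONDITION & SPEC =====
def Spec_get_scenario_fields (scenario_name : String) (examples : List (String × String)) (out : List (String × String)) : Prop := out = get_scenario_fields_alt scenario_name examples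
instance (scenario_name : String) (examples : List (String × String)) (out : List (String × String)) : Decidable (Spec_get_scenario_fields scenario_name examples out) := by unfold Spec_get_scenario_fields; infer_instance

-- ===== CLAIM (what is proved, stated in full; the proofs are below) =====
def Claim_equal_get_scenario_fields : Prop := ∀ (scenario_name : String) (examples : List (String × String)), Dom_get_scenario_fields scenario_name examples → Spec_get_scenario_fields scenario_name examples (get_scenario_fields scenario_name examples)

-- ===== LEMMAS AND PROOFS =====

-- Set membership after an add.
theorem pv_contains_add (s : PySem.Set String) (a k : String) :
    PySem.Set.contains (PySem.Set.add s a) k = (k == a || PySem.Set.contains s k) := by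
  by_cases hm : PySem.Set.contains s a
  · simp only [PySem.Set.add, if_pos hm]
    by_cases hk : k = a
    · subst hk
      simp [(PySem.Set.contains_iff s k).mp hm]
    · simp [hk]
  · simp only [PySem.Set.add, if_neg hm]
    by_cases hk : k = a
    · subst hk
      simp [PySem.Set.contains_eq_listContains]
    · simp [PySem.Set.contains_eq_listContains, hk]

-- A's final loop (insert only absent keys) produces, after a dict whose key set
-- matches `seen`, exactly the first-wins dedup of `ex` appended to the dict's items.
theorem pv_foldl_firstWins (ex : List (String × String)) :
    ∀ (d : PySem.Dict String String) (seen : PySem.Set String),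
    (∀ k, d.contains k = PySem.Set.contains seen k) →
    (ex.foldl (fun d kv => if d.contains kv.1 then d else d.insert kv.1 kv.2) d).items
      = d.items ++ pvFirstWins ex seen := by
  induction ex with
  | nil => intro d seen _; simp [pvFirstWins]
  | cons kv rest ih =>
    intro d seen h
    rw [List.foldl_cons]
    by_cases hc : d.contains kv.1
    · rw [if_pos hc]
      have hs : PySem.Set.contains seen kv.1 = true := by rw [← h]; exact hc
      simp only [pvFirstWins, hs, if_pos]
      exact ih d seen h
    · rw [if_neg hc]
      have hs : PySem.Set.contains seen kv.1 = false := by rw [← h]; simpa using hc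
      simp only [pvFirstWins, hs, Bool.false_eq_true, if_false]
      rw [ih (d.insert kv.1 kv.2) (PySem.Set.add seen kv.1)
            (by intro k
                rw [PySem.Dict.contains_insert, pv_contains_add, h]),
          PySem.Dict.items_insert_of_not_contains _ _ (by simpa using hc),
          List.append_assoc, List.cons_append, List.nil_append]

-- Folding plain inserts over a dict keeps its key set in step with folding adds over a set.
theorem pv_contains_foldl (p : List (String × String)) :
    ∀ (d : PySem.Dict String String) (s : PySem.Set String),
    (∀ k, d.contains k = PySem.Set.contains s k) →
    ∀ k, (p.foldl (fun d kv => d.insert kv.1 kv.2) d).contains k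
        = PySem.Set.contains (p.foldl (fun s kv => PySem.Set.add s kv.1) s) k := by
  induction p with
  | nil => intro d s h k; exact h k
  | cons kv rest ih =>
    intro d s h k
    rw [List.foldl_cons, List.foldl_cons]
    exact ih _ _ (by intro k'; rw [PySem.Dict.contains_insert, pv_contains_add, h]) k

-- First-wins over a prefix of fresh, pairwise-distinct keys keeps the prefix verbatim.
theorem pv_fw_prefix (p : List (String × String)) :
    ∀ (seen : PySem.Set String) (ex : List (String × String)),
    (p.map Prod.fst).Nodup → (∀ kv ∈ p, PySem.Set.contains seen kv.1 = false) →
    pvFirstWins (p ++ ex) seen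
      = p ++ pvFirstWins ex (p.foldl (fun s kv => PySem.Set.add s kv.1) seen) := by
  induction p with
  | nil => intro seen ex _ _; simp
  | cons kv rest ih =>
    intro seen ex hnd hfresh
    simp only [List.map_cons, List.nodup_cons] at hnd
    obtain ⟨hk, hnd⟩ := hnd
    have h0 : PySem.Set.contains seen kv.1 = false := hfresh kv List.mem_cons_self
    rw [List.cons_append]
    simp only [pvFirstWins, h0, Bool.false_eq_true, if_false]
    rw [ih (PySem.Set.add seen kv.1) ex hnd
          (by intro kv' hm
              have h1 : kv'.1 ≠ kv.1 := fun h => hk (h ▸ List.mem_map_of_mem hm)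
              rw [pv_contains_add, hfresh kv' (List.mem_cons_of_mem _ hm)]
              simp [h1]),
        List.foldl_cons, List.cons_append]

-- The key reduction: A's dict pipeline from a fresh-keyed prefix p equals B's
-- first-wins dedup of the concatenated stream p ++ ex.
theorem pv_key (p ex : List (String × String)) (hnd : (p.map Prod.fst).Nodup) :
    (ex.foldl (fun d kv => if d.contains kv.1 then d else d.insert kv.1 kv.2)
        (p.foldl (fun d kv => d.insert kv.1 kv.2) PySem.Dict.empty)).items
      = pvFirstWins (p ++ ex) PySem.Set.empty := by
  rw [pv_fw_prefix p PySem.Set.empty ex hnd (by intro kv _; rfl),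
      pv_foldl_firstWins ex _ _ (pv_contains_foldl p PySem.Dict.empty PySem.Set.empty
        (by intro k; rfl))]
  congr 1
  have h := PySem.Dict.items_foldl_insert_fresh (l := p) (k := Prod.fst) (v := Prod.snd)
      (d := PySem.Dict.empty) (by intro a _; rfl) (by simpa using hnd)
  simpa using h

-- ===== VERDICT (by name: the statement is the Claim_ definition above) =====
set_option maxRecDepth 100000 in
set_option maxHeartbeats 4000000 in
theorem get_scenario_fields_spec : Claim_equal_get_scenario_fields := by
  intro sn ex _
  unfold Spec_get_scenario_fields get_scenario_fields get_scenario_fields_alt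
  by_cases h1 : sn = "Domestic Payment"
  · subst h1
    exact pv_key
      ([("/Document/FIToFICstmrCdtTrf/GrpHdr/MsgId", "MSG-" ++ PySem.Str.upper (PySem.Str.replace "Domestic Payment" " " "-") ++ "-001"),
         ("/Document/FIToFICstmrCdtTrf/GrpHdr/CreDtTm", "2025-04-03T12:00:00Z"),
         ("/Document/FIToFICstmrCdtTrf/GrpHdr/NbOfTxs", "1"),
         ("/Document/FIToFICstmrCdtTrf/GrpHdr/SttlmInf/SttlmMtd", "CLRG"),
         ("/Document/FIToFICstmrCdtTrf/CdtTrfTxInf/PmtId/EndToEndId", "E2E-" ++ PySem.Str.upper (PySem.Str.replace "Domestic Payment" " " "-") ++ "-001")]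
       ++ (List.lookup "Domestic Payment" pvScenarioTable).getD []) ex (by decide)
  · by_cases h2 : sn = "Cross-Border Payment"
    · subst h2
      exact pv_key
        ([("/Document/FIToFICstmrCdtTrf/GrpHdr/MsgId", "MSG-" ++ PySem.Str.upper (PySem.Str.replace "Cross-Border Payment" " " "-") ++ "-001"),
         ("/Document/FIToFICstmrCdtTrf/GrpHdr/CreDtTm", "2025-04-03T12:00:00Z"),
         ("/Document/FIToFICstmrCdtTrf/GrpHdr/NbOfTxs", "1"),
         ("/Document/FIToFICstmrCdtTrf/GrpHdr/SttlmInf/SttlmMtd", "CLRG"),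
         ("/Document/FIToFICstmrCdtTrf/CdtTrfTxInf/PmtId/EndToEndId", "E2E-" ++ PySem.Str.upper (PySem.Str.replace "Cross-Border Payment" " " "-") ++ "-001")]
         ++ (List.lookup "Cross-Border Payment" pvScenarioTable).getD []) ex (by decide)
    · have e1 : (sn == "Domestic Payment") = false := beq_eq_false_iff_ne.mpr h1
      have e2 : (sn == "Cross-Border Payment") = false := beq_eq_false_iff_ne.mpr h2
      have hl : List.lookup sn pvScenarioTable = none := by
        simp [pvScenarioTable, List.lookup, e1, e2]
      simp only [if_neg h1, if_neg h2, hl, Option.getD_none, List.append_nil]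
      exact pv_key
        [("/Document/FIToFICstmrCdtTrf/GrpHdr/MsgId", "MSG-" ++ PySem.Str.upper (PySem.Str.replace sn " " "-") ++ "-001"),
         ("/Document/FIToFICstmrCdtTrf/GrpHdr/CreDtTm", "2025-04-03T12:00:00Z"),
         ("/Document/FIToFICstmrCdtTrf/GrpHdr/NbOfTxs", "1"),
         ("/Document/FIToFICstmrCdtTrf/GrpHdr/SttlmInf/SttlmMtd", "CLRG"),
         ("/Document/FIToFICstmrCdtTrf/CdtTrfTxInf/PmtId/EndToEndId", "E2E-" ++ PySem.Str.upper (PySem.Str.replace sn " " "-") ++ "-001")] ex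
        (by simp only [List.map_cons, List.map_nil]; decide)
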